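-- pv_equiv track=rewrite | github.com/nahoom567/PinkFloyd | data.py | get_len_song
-- ===== SOURCE A (Python) =====
-- def get_len_song(dict_album, name_song):
--     """
--     This function finds the length of the chosen song
--     :param dict_album: data structure in which all the information is stored
--     :type dict_album: dict
--     :param name_song: the name of the chosen song
--     :type name_song: str
--     :return: the length of the chosen song
--     :rtype: str
--     """
--     length_song = 0
--     for songs in dict_album.values():
--         for song in songs[1:]:
--             if song[0] == name_song:
--                 length_song = song[2]
--     if length_song == 0:
--         return "There is no such song"
--     return str(length_song)
-- ===== SOURCE B (Python) =====
-- def get_len_song(dict_album, name_song):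
--     """Back-to-front scan with early exit: the LAST match in iteration order is
--     the FIRST match of the reversed traversal, so we can return immediately."""
--     for songs in reversed(list(dict_album.values())):
--         for song in reversed(songs[1:]):
--             if song[0] == name_song:
--                 return str(song[2])
--     return "There is no such song"
-- ===== Notes on version B (the rewrite author's own statement) =====
-- stated objective: alternative
-- what changed: Replaces A's exhaustive forward scan with a last-match accumulator by a reversed traversal (albums and songs back-to-front) that returns on the first match, so the scan stops early instead of always visiting every song.
import Mathlib
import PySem

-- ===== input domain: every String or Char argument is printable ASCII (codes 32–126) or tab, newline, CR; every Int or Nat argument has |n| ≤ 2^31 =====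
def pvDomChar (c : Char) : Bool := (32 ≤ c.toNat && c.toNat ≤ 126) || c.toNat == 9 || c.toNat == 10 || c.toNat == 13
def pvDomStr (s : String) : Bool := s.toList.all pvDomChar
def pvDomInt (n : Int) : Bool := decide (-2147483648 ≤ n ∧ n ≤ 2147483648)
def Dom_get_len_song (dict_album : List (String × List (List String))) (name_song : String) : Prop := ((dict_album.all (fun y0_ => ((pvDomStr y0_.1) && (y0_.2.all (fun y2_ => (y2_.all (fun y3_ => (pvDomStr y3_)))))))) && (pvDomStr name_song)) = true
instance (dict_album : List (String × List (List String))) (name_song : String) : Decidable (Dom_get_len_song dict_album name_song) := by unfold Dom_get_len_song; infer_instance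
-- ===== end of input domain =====

-- B replaces A's full forward scan keeping the last match by a reversed, early-exit scan
-- returning the first match of the back-to-front traversal (objective: alternative).

-- ===== PORT A =====
-- length_song is 0 (int) until a match overwrites it with song[2] (a str); modelled as
-- Option String: none = the int 0 sentinel (a str can never == 0 in Python).
-- song[0] / song[2] use pyGet?; under Pre_ they are `some`.
def get_len_song (dict_album : List (String × List (List String))) (name_song : String) : String :=
  let length_song : Option String :=
    dict_album.foldl (fun acc kv =>
      (PySem.List.slice kv.2 (some 1) none).foldl (fun acc song =>
        if PySem.List.pyGet? song 0 = some name_song then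
          PySem.List.pyGet? song 2
        else acc) acc) none
  match length_song with
  | none => "There is no such song"
  | some s => s

-- ===== PORT B =====
-- first match of the reversed song list; `some r` = matched (r = song[2], some under Pre_)
def pvGoSongs (name_song : String) : List (List String) → Option (Option String)
  | [] => none
  | song :: rest =>
    if PySem.List.pyGet? song 0 = some name_song then
      some (PySem.List.pyGet? song 2)
    else pvGoSongs name_song rest

def pvGoAlbums (name_song : String) : List (String × List (List String)) → Option (Option String)
  | [] => none
  | kv :: rest =>
    match pvGoSongs name_song (PySem.List.slice kv.2 (some 1) none).reverse with
    | some r => some r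
    | none => pvGoAlbums name_song rest

def get_len_song_alt (dict_album : List (String × List (List String))) (name_song : String) : String :=
  match pvGoAlbums name_song dict_album.reverse with
  | some (some s) => s
  | _ => "There is no such song"

-- ===== PRECONDITION & SPEC =====
-- Pre_ excludes exactly the inputs where Python A raises IndexError: an empty song list
-- in some album tail (song[0]), or a matching song with fewer than 3 fields (song[2]).
def Pre_get_len_song (dict_album : List (String × List (List String))) (name_song : String) : Prop :=
  ∀ kv ∈ dict_album, ∀ song ∈ kv.2.drop 1,
    song ≠ [] ∧ (song.headI = name_song → 3 ≤ song.length)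
instance (dict_album : List (String × List (List String))) (name_song : String) : Decidable (Pre_get_len_song dict_album name_song) := by unfold Pre_get_len_song; infer_instance
def pvWitness_get_len_song : (List (String × List (List String))) × String :=
  ([("a", [["Album"], ["s1", "by", "4:00"]])], "s1")
def Spec_get_len_song (dict_album : List (String × List (List String))) (name_song : String) (out : String) : Prop := out = get_len_song_alt dict_album name_song
instance (dict_album : List (String × List (List String))) (name_song : String) (out : String) : Decidable (Spec_get_len_song dict_album name_song out) := by unfold Spec_get_len_song; infer_instance

-- ===== CLAIM (what is proved, stated in full; the proofs are below) =====
def Claim_equal_get_len_song : Prop := ∀ (dict_album : List (String × List (List String))) (name_song : String), Dom_get_len_song dict_album name_song → Pre_get_len_song dict_album name_song → Spec_get_len_song dict_album name_song (get_len_song dict_album name_song)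

-- ===== LEMMAS AND PROOFS =====

theorem pvGoSongs_append (n : String) (a b : List (List String)) :
    pvGoSongs n (a ++ b) = ((pvGoSongs n a).orElse (fun _ => pvGoSongs n b)) := by
  induction a with
  | nil => simp [pvGoSongs]
  | cons s rest ih =>
    simp only [List.cons_append, pvGoSongs]
    split <;> simp [ih]

theorem pvGoAlbums_append (n : String) (a b : List (String × List (List String))) :
    pvGoAlbums n (a ++ b) = ((pvGoAlbums n a).orElse (fun _ => pvGoAlbums n b)) := by
  induction a with
  | nil => simp [pvGoAlbums]
  | cons kv rest ih =>
    simp only [List.cons_append, pvGoAlbums]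
    split <;> simp_all

-- A's inner fold over a song list equals B's first match of the reversed list (else acc).
theorem songs_fold_eq (n : String) (l : List (List String)) (acc : Option String) :
    l.foldl (fun acc song =>
        if PySem.List.pyGet? song 0 = some n then PySem.List.pyGet? song 2 else acc) acc
      = match pvGoSongs n l.reverse with
        | some r => r
        | none => acc := by
  induction l generalizing acc with
  | nil => simp [pvGoSongs]
  | cons s rest ih =>
    simp only [List.foldl_cons, List.reverse_cons, pvGoSongs_append, ih]
    cases h : pvGoSongs n rest.reverse <;> simp [pvGoSongs, Option.orElse] <;> split <;> simp

theorem albums_fold_eq (n : String) (l : List (String × List (List String))) (acc : Option String) :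
    l.foldl (fun acc kv =>
        (PySem.List.slice kv.2 (some 1) none).foldl (fun acc song =>
          if PySem.List.pyGet? song 0 = some n then PySem.List.pyGet? song 2 else acc) acc) acc
      = match pvGoAlbums n l.reverse with
        | some r => r
        | none => acc := by
  induction l generalizing acc with
  | nil => simp [pvGoAlbums]
  | cons kv rest ih =>
    rw [List.foldl_cons, ih, songs_fold_eq, List.reverse_cons, pvGoAlbums_append]
    cases h : pvGoAlbums n rest.reverse with
    | some v => simp [Option.orElse]
    | none =>
      cases hs : pvGoSongs n (PySem.List.slice kv.2 (some 1) none).reverse <;>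
        simp [pvGoAlbums, Option.orElse, hs]

-- under Pre_, a matched song's pyGet? 2 is some, so the result of pvGoAlbums is never `some none`
theorem pvGoSongs_no_some_none (n : String) (l : List (List String))
    (h : ∀ song ∈ l, song ≠ [] ∧ (song.headI = n → 3 ≤ song.length)) :
    pvGoSongs n l ≠ some none := by
  induction l with
  | nil => simp [pvGoSongs]
  | cons s rest ih =>
    obtain ⟨hne, hlen⟩ := h s (by simp)
    simp only [pvGoSongs]
    split
    · rename_i hm
      intro hc
      simp only [Option.some.injEq] at hc
      rw [PySem.List.pyGet?_eq_none_iff] at hc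
      have h0 : PySem.List.pyGet? s 0 = some s.headI := by
        cases s with
        | nil => exact absurd rfl hne
        | cons a t => simp [List.headI]
      rw [h0] at hm
      have := hlen (by injection hm)
      exact hc (by unfold PySem.Raise.InRange; omega)
    · exact ih (fun song hs => h song (by simp [hs]))

theorem pvGoAlbums_no_some_none (n : String) (l : List (String × List (List String)))
    (h : ∀ kv ∈ l, ∀ song ∈ kv.2.drop 1, song ≠ [] ∧ (song.headI = n → 3 ≤ song.length)) :
    pvGoAlbums n l ≠ some none := by
  induction l with
  | nil => simp [pvGoAlbums]
  | cons kv rest ih =>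
    simp only [pvGoAlbums]
    split
    · rename_i r hr
      intro hc
      have hs : ∀ song ∈ (PySem.List.slice kv.2 (some 1) none).reverse,
          song ≠ [] ∧ (song.headI = n → 3 ≤ song.length) := by
        intro song hsong
        have : song ∈ kv.2.drop 1 := by
          have := List.mem_reverse.mp hsong
          simpa [PySem.List.slice_from_one, ← List.drop_one] using this
        exact h kv (by simp) song this
      have := pvGoSongs_no_some_none n _ hs
      simp only [Option.some.injEq] at hc
      exact this (hc ▸ hr)
    · exact ih (fun kv' hkv' => h kv' (by simp [hkv']))

-- ===== VERDICT (by name: the statement is the Claim_ definition above) =====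
theorem get_len_song_spec : Claim_equal_get_len_song := by
  intro d n _ hpre
  unfold Spec_get_len_song get_len_song get_len_song_alt
  rw [albums_fold_eq]
  have hno : pvGoAlbums n d.reverse ≠ some none := by
    apply pvGoAlbums_no_some_none
    intro kv hkv
    exact hpre kv (List.mem_reverse.mp hkv)
  cases h : pvGoAlbums n d.reverse with
  | none => simp
  | some r => cases r with
    | none => exact absurd h hno
    | some s => simp
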